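/- GENERATED by tools/mkcompositions.py from design/units.gif.tsv (unit `digest_map.COMPOSITION`) — do not edit.
   THE PROOF of the composition unit `digest_map.COMPOSITION`: the 3 segments of `digest_map` chain into its contract, by the theorem
   `Gif.Spec.digest_map.compose` (proved next to the cut assertions). -/
import Gif.Spec.Units.digest_map_COMPOSITION

/-- The segments of `digest_map` compose into its contract. -/
theorem Gif.Spec.Proved.digest_map_COMPOSITION_ok : Gif.Spec.digest_map_COMPOSITION.Statement := by
  intro Lay _hLay μ _hμ u₀ h_digest_map_1 h_digest_map_2 h_digest_map_E
  apply Gif.Spec.digest_map.compose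
  all_goals assumption
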